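-- pv_equiv track=rewrite | github.com/ilialecha/Programming_1 | Exam-1-review/let_after_digit.py | let_after_digit
-- ===== SOURCE A (Python) =====
-- def let_after_digit(s):
-- 	'''
-- 	>>> let_after_digit('Game Over')
-- 	(False, '#')
-- 	>>> let_after_digit('Error 324:---Identifier not defined---')
-- 	(True, 'I')
-- 	>>> let_after_digit('xRs123')
-- 	(False, '#')
-- 	>>> let_after_digit('1@#$X2Y')
-- 	(True, 'X')
-- 	'''
--
-- 	digit_found = False
--
-- 	for char in s:
-- 		if char.isdigit() and not digit_found:
-- 			digit_found = True
--
-- 		if digit_found and char.isalpha():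
-- 			return (True, char)
--
-- 	return (False, "#")
-- ===== SOURCE B (Python) =====
-- def let_after_digit(s):
--     # Right-to-left pass with two accumulators (DP over suffixes):
--     # res_flag  = answer for the current suffix assuming a digit was already seen before it,
--     # res_noflag = answer for the current suffix assuming no digit seen yet.
--     res_flag = (False, "#")
--     res_noflag = (False, "#")
--     for c in reversed(s):
--         if c.isalpha():
--             res_flag = (True, c)
--         if c.isdigit():
--             res_noflag = res_flag
--     return res_noflag
-- ===== Notes on version B (the rewrite author's own statement) =====
-- stated objective: alternative
-- what changed: Replaces A's forward flag-latched scan with a single right-to-left fold that maintains two accumulators (the answer for the suffix assuming a digit was already seen, and assuming not) and returns the no-flag accumulator.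
import Mathlib
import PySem

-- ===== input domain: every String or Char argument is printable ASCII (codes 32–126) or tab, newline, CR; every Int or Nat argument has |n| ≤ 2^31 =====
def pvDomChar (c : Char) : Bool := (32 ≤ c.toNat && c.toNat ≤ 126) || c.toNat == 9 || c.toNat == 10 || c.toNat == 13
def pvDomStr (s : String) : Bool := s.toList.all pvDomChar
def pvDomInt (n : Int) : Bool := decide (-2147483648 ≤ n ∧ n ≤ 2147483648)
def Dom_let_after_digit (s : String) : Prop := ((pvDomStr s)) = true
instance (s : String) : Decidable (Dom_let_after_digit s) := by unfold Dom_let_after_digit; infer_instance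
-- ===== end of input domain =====

-- B replaces A's forward flag-latched scan by a right-to-left fold with two accumulators (DP over suffixes); same cost, different traversal.


-- ===== PORT A =====
-- A's single forward pass: a flag latched at the first digit; return the first alpha seen while the flag is set.
def letAfterDigitLoopA : List Char → Bool → Bool × String
  | [], _ => (false, "#")
  | c :: rest, digitFound =>
    let digitFound := if PySem.Chars.isdigit c && !digitFound then true else digitFound
    if digitFound && PySem.Chars.isalpha c then (true, String.ofList [c])
    else letAfterDigitLoopA rest digitFound

def let_after_digit (s : String) : Bool × String :=
  letAfterDigitLoopA s.toList false

-- ===== PORT B =====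
-- B's loop body: update (res_flag, res_noflag) for one character of the reversed traversal.
def letAfterDigitStepB (st : (Bool × String) × (Bool × String)) (c : Char) :
    (Bool × String) × (Bool × String) :=
  let rf := if PySem.Chars.isalpha c then (true, String.ofList [c]) else st.1
  let rn := if PySem.Chars.isdigit c then rf else st.2
  (rf, rn)

def let_after_digit_alt (s : String) : Bool × String :=
  (s.toList.reverse.foldl letAfterDigitStepB ((false, "#"), (false, "#"))).2

-- ===== PRECONDITION & SPEC =====
def Spec_let_after_digit (s : String) (out : Bool × String) : Prop := out = let_after_digit_alt s
instance (s : String) (out : Bool × String) : Decidable (Spec_let_after_digit s out) := by unfold Spec_let_after_digit; infer_instance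

-- ===== CLAIM =====
def Claim_equal_let_after_digit : Prop := ∀ (s : String), Dom_let_after_digit s → Spec_let_after_digit s (let_after_digit s)

-- ===== LEMMAS AND PROOFS =====

-- The reversed foldl is a foldr; its state components are A's loop run with flag true resp. false.
theorem foldrB_eq_loopA (xs : List Char) :
    xs.foldr (fun c st => letAfterDigitStepB st c) ((false, "#"), (false, "#")) =
      (letAfterDigitLoopA xs true, letAfterDigitLoopA xs false) := by
  induction xs with
  | nil => rfl
  | cons c rest ih =>
    rw [List.foldr_cons, ih]
    by_cases hd : PySem.Chars.isdigit c = true <;>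
      by_cases ha : PySem.Chars.isalpha c = true <;>
        simp [letAfterDigitStepB, letAfterDigitLoopA, hd, ha]

-- ===== VERDICT =====
theorem let_after_digit_spec : Claim_equal_let_after_digit := by
  intro s _
  unfold Spec_let_after_digit let_after_digit let_after_digit_alt
  rw [List.foldl_reverse, foldrB_eq_loopA]
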